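-- pv_equiv track=rewrite | github.com/MasterSpam/Informatik_1_HS2022 | Final_Exam/pangram.py | is_perfect_pangram
-- ===== SOURCE A (Python) =====
-- def is_perfect_pangram(string, alphabet=None):
--     if not alphabet:
--         alphabet = "abcdefghijklmnopqrstuvwxyz"
--
--     short_string = ''.join(e.lower() for e in string if e.isalpha())
--     for char in short_string:
--         if char.lower() not in alphabet:
--             return False
--         alphabet= alphabet.replace(char.lower(), "")
--
--     if not alphabet:
--         return True
--     return False
-- ===== SOURCE B (Python) =====
-- def is_perfect_pangram(string, alphabet=None):
--     if not alphabet: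
--         alphabet = "abcdefghijklmnopqrstuvwxyz"
--
--     short = [c.lower() for c in string if c.isalpha()]
--     return set(short) == set(alphabet) and len(set(short)) == len(short)
-- ===== Notes on version B (the rewrite author's own statement) =====
-- stated objective: simpler
-- what changed: Replaces A's per-character consumption loop that mutates the alphabet string with replace() by a single set comparison plus a duplicate check via len(set(short)) == len(short); no loop and no string mutation.
import Mathlib
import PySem

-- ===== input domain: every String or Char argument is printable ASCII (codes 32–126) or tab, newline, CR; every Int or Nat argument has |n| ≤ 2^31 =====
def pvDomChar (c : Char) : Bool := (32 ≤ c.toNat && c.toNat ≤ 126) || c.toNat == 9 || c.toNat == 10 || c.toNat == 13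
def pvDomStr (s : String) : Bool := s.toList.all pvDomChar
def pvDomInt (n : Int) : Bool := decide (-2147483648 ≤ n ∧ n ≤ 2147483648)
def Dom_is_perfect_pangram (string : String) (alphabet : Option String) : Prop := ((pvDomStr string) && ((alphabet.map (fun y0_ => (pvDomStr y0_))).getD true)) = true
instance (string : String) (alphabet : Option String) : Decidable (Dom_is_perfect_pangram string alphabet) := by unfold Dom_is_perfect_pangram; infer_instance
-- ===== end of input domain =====

-- B replaces A's per-character consumption loop (which mutates the alphabet via replace)
-- by one set comparison plus a duplicate check via lengths; objective: simpler.

-- ===== PORT A =====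
-- the 'for char in short_string' loop: early-return False, then 'if not alphabet: return True / return False'
def pangramLoopA (chars : List Char) (alpha : List Char) : Bool :=
  match chars with
  | [] => alpha.isEmpty
  | c :: cs =>
    let cl := PySem.Chars.lowerChar c
    if PySem.Chars.isIn [cl] alpha then
      pangramLoopA cs (PySem.Chars.replace alpha [cl] [])
    else
      false

def is_perfect_pangram (string : String) (alphabet : Option String) : Bool :=
  let alpha : String :=
    match alphabet with
    | none => "abcdefghijklmnopqrstuvwxyz"
    | some s => if s = "" then "abcdefghijklmnopqrstuvwxyz" else s
  let short : List Char :=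
    (string.toList.filter PySem.Chars.isalpha).map PySem.Chars.lowerChar
  pangramLoopA short alpha.toList

-- ===== PORT B =====
def is_perfect_pangram_alt (string : String) (alphabet : Option String) : Bool :=
  let alpha : String :=
    match alphabet with
    | none => "abcdefghijklmnopqrstuvwxyz"
    | some s => if s = "" then "abcdefghijklmnopqrstuvwxyz" else s
  let short : List Char :=
    (string.toList.filter PySem.Chars.isalpha).map PySem.Chars.lowerChar
  let sh : PySem.Set Char := PySem.Set.ofList short
  PySem.Set.equal sh (PySem.Set.ofList alpha.toList) &&
    (PySem.Set.len sh == (short.length : Int))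

-- ===== PRECONDITION & SPEC =====
def Spec_is_perfect_pangram (string : String) (alphabet : Option String) (out : Bool) : Prop := out = is_perfect_pangram_alt string alphabet
instance (string : String) (alphabet : Option String) (out : Bool) : Decidable (Spec_is_perfect_pangram string alphabet out) := by unfold Spec_is_perfect_pangram; infer_instance

-- ===== CLAIM (what is proved, stated in full; the proofs are below) =====
def Claim_equal_is_perfect_pangram : Prop := ∀ (string : String) (alphabet : Option String), Dom_is_perfect_pangram string alphabet → Spec_is_perfect_pangram string alphabet (is_perfect_pangram string alphabet)

-- ===== LEMMAS AND PROOFS =====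

-- alphabet.replace(c, "") is a filter
theorem replace_go_singleton (c : Char) :
    ∀ (fuel : Nat) (l acc : List Char), l.length ≤ fuel →
      PySem.Chars.replace.go [c] [] fuel l acc = acc.reverse ++ l.filter (fun x => x != c) := by
  intro fuel
  induction fuel with
  | zero =>
    intro l acc h
    have : l = [] := List.length_eq_zero_iff.mp (Nat.le_zero.mp h)
    subst this
    simp [PySem.Chars.replace.go]
  | succ n ih =>
    intro l acc h
    cases l with
    | nil => simp [PySem.Chars.replace.go]
    | cons x t =>
      simp only [PySem.Chars.replace.go]
      by_cases hx : x = c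
      · subst hx
        have hp : [x].isPrefixOf (x :: t) = true := by simp [List.isPrefixOf]
        rw [if_pos hp]
        have := ih t acc (by simpa using Nat.le_of_succ_le_succ h)
        simpa [List.filter] using this
      · have hp : [c].isPrefixOf (x :: t) = false := by
          simp [List.isPrefixOf]
          exact fun h' => hx h'.symm
        rw [hp]
        simp only [Bool.false_eq_true, if_false]
        have := ih t (x :: acc) (by simpa using Nat.le_of_succ_le_succ h)
        rw [this]
        have hbne : (x != c) = true := by simp [hx]
        simp [hbne]

theorem replace_singleton (c : Char) (l : List Char) :
    PySem.Chars.replace l [c] [] = l.filter (fun x => x != c) := by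
  simp only [PySem.Chars.replace, List.isEmpty_cons, Bool.false_eq_true, if_false]
  simpa using replace_go_singleton c l.length l [] (le_refl _)

theorem char_le_iff (a b : Char) : a ≤ b ↔ a.toNat ≤ b.toNat :=
  ⟨fun h => Fin.mk_le_mk.mp h, fun h => Fin.mk_le_mk.mpr h⟩

theorem lowerChar_idem (c : Char) :
    PySem.Chars.lowerChar (PySem.Chars.lowerChar c) = PySem.Chars.lowerChar c := by
  unfold PySem.Chars.lowerChar PySem.Chars.isupper
  by_cases h : ('A' ≤ c ∧ c ≤ 'Z')
  · obtain ⟨h1, h2⟩ := h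
    have hn1 : 65 ≤ c.toNat := (char_le_iff 'A' c).mp h1
    have hn2 : c.toNat ≤ 90 := (char_le_iff c 'Z').mp h2
    have hval : (Char.ofNat (c.toNat + 32)).toNat = c.toNat + 32 := by
      rw [Char.toNat_ofNat, if_pos]
      exact Or.inl (by omega)
    have hA : ¬ (Char.ofNat (c.toNat + 32) ≤ 'Z') := by
      intro hc
      have hle := (char_le_iff _ 'Z').mp hc
      rw [hval] at hle
      have hZ : 'Z'.toNat = 90 := rfl
      omega
    simp [h1, h2, hA]
  · simp [h]

-- characterisation of A's consumption loop
theorem pangramLoopA_iff (cs : List Char) :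
    ∀ (alpha : List Char), (∀ x ∈ cs, PySem.Chars.lowerChar x = x) →
      (pangramLoopA cs alpha = true ↔
        ((∀ x ∈ cs, x ∈ alpha) ∧ (∀ a ∈ alpha, a ∈ cs) ∧ cs.Nodup)) := by
  induction cs with
  | nil =>
    intro alpha _
    simp [pangramLoopA, List.isEmpty_iff, List.eq_nil_iff_forall_not_mem]
  | cons c cs ih =>
    intro alpha hlow
    have hc : PySem.Chars.lowerChar c = c := hlow c (by simp)
    simp only [pangramLoopA, hc]
    by_cases hmem : c ∈ alpha
    · rw [if_pos (by rw [PySem.Chars.isIn_iff_infix]; exact (List.singleton_infix_iff c alpha).mpr hmem)]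
      rw [replace_singleton]
      rw [ih _ (fun x hx => hlow x (by simp [hx]))]
      constructor
      · rintro ⟨h1, h2, h3⟩
        have hcnot : c ∉ cs := by
          intro hccs
          have := h1 c hccs
          simp [List.mem_filter] at this
        refine ⟨?_, ?_, ?_⟩
        · intro x hx
          rcases List.mem_cons.mp hx with rfl | hx
          · exact hmem
          · exact (List.mem_filter.mp (h1 x hx)).1
        · intro a ha
          by_cases hac : a = c
          · simp [hac]
          · exact List.mem_cons_of_mem _ (h2 a (List.mem_filter.mpr ⟨ha, by simp [hac]⟩))
        · exact List.nodup_cons.mpr ⟨hcnot, h3⟩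
      · rintro ⟨h1, h2, h3⟩
        have hcnot : c ∉ cs := (List.nodup_cons.mp h3).1
        refine ⟨?_, ?_, (List.nodup_cons.mp h3).2⟩
        · intro x hx
          refine List.mem_filter.mpr ⟨h1 x (List.mem_cons_of_mem _ hx), ?_⟩
          simp only [bne_iff_ne, ne_eq]
          rintro rfl
          exact hcnot hx
        · intro a ha
          rcases List.mem_filter.mp ha with ⟨ha', hane⟩
          rcases List.mem_cons.mp (h2 a ha') with rfl | h
          · simp at hane
          · exact h
    · rw [if_neg (by rw [PySem.Chars.isIn_iff_infix, List.singleton_infix_iff]; exact hmem)]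
      simp only [Bool.false_eq_true, false_iff]
      rintro ⟨h1, _, _⟩
      exact hmem (h1 c (by simp))

theorem ofList_sublist {α : Type} [BEq α] [LawfulBEq α] (xs : List α) :
    List.Sublist (PySem.Set.ofList xs) xs := by
  induction xs with
  | nil => simp [PySem.Set.ofList_nil]
  | cons x xs ih =>
    rw [PySem.Set.ofList_cons]
    refine List.Sublist.cons₂ x (List.Sublist.trans ?_ ih)
    unfold PySem.Set.discard
    exact List.filter_sublist

theorem ofList_length_iff_nodup {α : Type} [BEq α] [LawfulBEq α] (xs : List α) :
    (PySem.Set.ofList xs).length = xs.length ↔ xs.Nodup := by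
  constructor
  · intro h
    have := (ofList_sublist xs).eq_of_length h
    rw [← this]
    exact PySem.Set.nodup_ofList xs
  · intro h
    rw [PySem.Set.ofList_eq_self_of_nodup xs h]

theorem pangram_key (string alpha : String) :
    pangramLoopA ((string.toList.filter PySem.Chars.isalpha).map PySem.Chars.lowerChar)
        alpha.toList
      = (PySem.Set.equal
            (PySem.Set.ofList ((string.toList.filter PySem.Chars.isalpha).map PySem.Chars.lowerChar))
            (PySem.Set.ofList alpha.toList) &&
         (PySem.Set.len
            (PySem.Set.ofList ((string.toList.filter PySem.Chars.isalpha).map PySem.Chars.lowerChar))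
          == (((string.toList.filter PySem.Chars.isalpha).map PySem.Chars.lowerChar).length : Int))) := by
  set short : List Char :=
    (string.toList.filter PySem.Chars.isalpha).map PySem.Chars.lowerChar with hshort
  have hlow : ∀ x ∈ short, PySem.Chars.lowerChar x = x := by
    intro x hx
    rw [hshort] at hx
    rcases List.mem_map.mp hx with ⟨y, _, rfl⟩
    exact lowerChar_idem y
  rw [Bool.eq_iff_iff]
  rw [pangramLoopA_iff short alpha.toList hlow]
  simp only [Bool.and_eq_true, PySem.Set.equal_iff, PySem.Set.mem_ofList, beq_iff_eq,
    PySem.Set.len]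
  constructor
  · rintro ⟨h1, h2, h3⟩
    refine ⟨fun x => ⟨fun hx => h1 x hx, fun hx => h2 x hx⟩, ?_⟩
    rw [ofList_length_iff_nodup short |>.mpr h3]
  · rintro ⟨h1, h2⟩
    have h3 : short.Nodup := by
      rw [← ofList_length_iff_nodup short]
      exact_mod_cast h2
    exact ⟨fun x hx => (h1 x).mp hx, fun a ha => (h1 a).mpr ha, h3⟩

-- ===== VERDICT (by name: the statement is the Claim_ definition above) =====
theorem is_perfect_pangram_spec : Claim_equal_is_perfect_pangram := by
  intro string alphabet _
  unfold Spec_is_perfect_pangram is_perfect_pangram is_perfect_pangram_alt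
  cases alphabet with
  | none => exact pangram_key string "abcdefghijklmnopqrstuvwxyz"
  | some s => exact pangram_key string (if s = "" then "abcdefghijklmnopqrstuvwxyz" else s)
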